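-- pv_equiv track=rewrite | github.com/yuuka51/lambda-managed-instances-labs | src/lmi_lab/impls/engines/common.py | diff_rows
-- ===== SOURCE A (Python) =====
-- def build_key(row: dict[str, str], primary_keys: list[str]) -> str:
--     missing_keys = [k for k in primary_keys if k not in row]
--     if missing_keys:
--         raise ValueError(f"Row is missing primary-key columns: {', '.join(missing_keys)}")
--     return "||".join(row[k] for k in primary_keys)
--
-- def diff_rows(
--     before_rows: list[dict[str, str]],
--     after_rows: list[dict[str, str]],
--     primary_keys: list[str],
-- ) -> list[dict[str, str]]:
--     bmap = {build_key(r, primary_keys): r for r in before_rows}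
--     amap = {build_key(r, primary_keys): r for r in after_rows}
--
--     diffs: list[dict[str, str]] = []
--     for key in sorted(set(bmap) | set(amap)):
--         b = bmap.get(key)
--         a = amap.get(key)
--         if b is None:
--             diffs.append({"key": key, "status": "INSERT", "changed_columns": ""})
--             continue
--         if a is None:
--             diffs.append({"key": key, "status": "DELETE", "changed_columns": ""})
--             continue
--         changed = sorted(c for c in set(b) | set(a) if b.get(c, "") != a.get(c, ""))
--         if changed:
--             diffs.append({"key": key, "status": "UPDATE", "changed_columns": "|".join(changed)})
--     return diffs
-- ===== SOURCE B (Python) =====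
-- def diff_rows(before_rows, after_rows, primary_keys):
--     def keyed(rows):
--         m = {}
--         for r in rows:
--             m["||".join(r[k] for k in primary_keys)] = r
--         return sorted(m.items(), key=lambda p: p[0])
--
--     bs = keyed(before_rows)
--     aft = keyed(after_rows)
--     out = []
--     i = j = 0
--     while i < len(bs) and j < len(aft):
--         bk, b = bs[i]
--         ak, a = aft[j]
--         if bk < ak:
--             out.append({"key": bk, "status": "DELETE", "changed_columns": ""})
--             i += 1
--         elif ak < bk:
--             out.append({"key": ak, "status": "INSERT", "changed_columns": ""})
--             j += 1
--         else:
--             changed = [c for c in sorted(set(b) | set(a)) if b.get(c, "") != a.get(c, "")]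
--             if changed:
--                 out.append({"key": bk, "status": "UPDATE", "changed_columns": "|".join(changed)})
--             i += 1
--             j += 1
--     out += [{"key": k, "status": "DELETE", "changed_columns": ""} for k, _ in bs[i:]]
--     out += [{"key": k, "status": "INSERT", "changed_columns": ""} for k, _ in aft[j:]]
--     return out
-- ===== Notes on version B (the rewrite author's own statement) =====
-- stated objective: alternative
-- what changed: B replaces A's dict-lookup loop over the sorted key union by a sort-merge diff: each side's keyed rows are sorted once and merged with two pointers, emitting DELETE/INSERT/UPDATE entries in order during the merge (plus tail flushes), with no key-set union and no per-key dict lookups.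
import Mathlib
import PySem

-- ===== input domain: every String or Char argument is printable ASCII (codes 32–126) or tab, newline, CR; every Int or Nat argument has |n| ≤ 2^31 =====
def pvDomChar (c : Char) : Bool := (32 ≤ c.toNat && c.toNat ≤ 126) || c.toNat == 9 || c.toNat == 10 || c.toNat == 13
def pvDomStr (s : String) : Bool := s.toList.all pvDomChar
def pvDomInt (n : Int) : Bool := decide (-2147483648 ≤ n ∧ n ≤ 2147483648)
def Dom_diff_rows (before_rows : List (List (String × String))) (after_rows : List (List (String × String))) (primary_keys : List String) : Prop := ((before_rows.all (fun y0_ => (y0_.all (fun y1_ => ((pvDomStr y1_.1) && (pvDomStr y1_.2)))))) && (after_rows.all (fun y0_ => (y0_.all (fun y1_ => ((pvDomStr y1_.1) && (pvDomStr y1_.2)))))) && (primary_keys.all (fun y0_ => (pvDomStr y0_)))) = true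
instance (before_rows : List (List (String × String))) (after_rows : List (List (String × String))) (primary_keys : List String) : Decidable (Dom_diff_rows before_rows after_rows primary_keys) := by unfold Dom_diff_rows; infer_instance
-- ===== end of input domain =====

-- B replaces A's dict-lookup loop over the sorted key union by a sort-merge diff: each side's keyed
-- rows are sorted once and merged with two pointers, emitting entries in key order during the merge.

-- ===== PORT A =====
-- build_key: none is exactly Python's ValueError on a row missing a primary-key column
def pvBuildKeyA? (row : List (String × String)) (primary_keys : List String) : Option String :=
  let missing := primary_keys.filter (fun k => !((PySem.Dict.mk row).contains k))
  if missing.isEmpty then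
    some (PySem.Str.join "||" (primary_keys.map (fun k => ((PySem.Dict.mk row).get? k).getD "")))
  else none

-- the dict comprehension {build_key(r, primary_keys): r for r in rows}; none if any build_key raises
def pvRowMapA (rows : List (List (String × String))) (primary_keys : List String) :
    Option (PySem.Dict String (List (String × String))) :=
  rows.foldl (fun od r => od.bind (fun d => (pvBuildKeyA? r primary_keys).map (fun k => d.insert k r)))
    (some PySem.Dict.empty)

-- sorted(c for c in set(b) | set(a) if b.get(c, "") != a.get(c, "")) — filter the union, then sort
def pvChangedA (b a : List (String × String)) : List String :=
  PySem.List.sorted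
    (((PySem.Set.ofList (PySem.Dict.mk b).keys).union (PySem.Set.ofList (PySem.Dict.mk a).keys)).filter
      (fun c => !((PySem.Dict.mk b).getD c "" == (PySem.Dict.mk a).getD c "")))
    (fun c => c) false

def diff_rows (before_rows : List (List (String × String))) (after_rows : List (List (String × String))) (primary_keys : List String) : List (List (String × String)) :=
  match pvRowMapA before_rows primary_keys, pvRowMapA after_rows primary_keys with
  | some bmap, some amap =>
    (PySem.List.sorted ((PySem.Set.ofList bmap.keys).union (PySem.Set.ofList amap.keys)) (fun k => k) false).foldl
      (fun diffs key =>
        match bmap.get? key with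
        | none => diffs ++ [[("key", key), ("status", "INSERT"), ("changed_columns", "")]]
        | some b =>
          match amap.get? key with
          | none => diffs ++ [[("key", key), ("status", "DELETE"), ("changed_columns", "")]]
          | some a =>
            let changed := pvChangedA b a
            if changed.isEmpty then diffs
            else diffs ++ [[("key", key), ("status", "UPDATE"), ("changed_columns", PySem.Str.join "|" changed)]])
      []
  | _, _ => []   -- unreached inside Pre_diff_rows (Python raises there)

-- ===== PORT B =====
-- "||".join(r[k] for k in primary_keys)  (only evaluated where every primary key is present;
-- a missing key raises in Python and lies outside Pre_)
def pvKeyOfB (row : List (String × String)) (primary_keys : List String) : String :=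
  PySem.Str.join "||" (primary_keys.map (fun k => ((PySem.Dict.mk row).get? k).getD ""))

-- m = {}; for r in rows: m[key] = r
def pvBuildMapB (rows : List (List (String × String))) (primary_keys : List String) :
    PySem.Dict String (List (String × String)) :=
  rows.foldl (fun m r => m.insert (pvKeyOfB r primary_keys) r) PySem.Dict.empty

-- sorted(m.items(), key=lambda p: p[0])
def pvKeyedB (rows : List (List (String × String))) (primary_keys : List String) :
    List (String × List (String × String)) :=
  PySem.List.sorted (pvBuildMapB rows primary_keys).items (fun p => p.1) false

def pvEntryB (key status cols : String) : List (String × String) :=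
  [("key", key), ("status", status), ("changed_columns", cols)]

-- [c for c in sorted(set(b) | set(a)) if b.get(c, "") != a.get(c, "")] — sort the union, then filter
def pvChangedB (b a : List (String × String)) : List String :=
  (PySem.List.sorted
      ((PySem.Set.ofList (PySem.Dict.mk b).keys).union (PySem.Set.ofList (PySem.Dict.mk a).keys))
      (fun c => c) false).filter
    (fun c => !((PySem.Dict.mk b).getD c "" == (PySem.Dict.mk a).getD c ""))

-- the two-pointer while loop plus the two tail flushes (bs[i:] deletes / aft[j:] inserts)
def pvMergeB : List (String × List (String × String)) → List (String × List (String × String)) →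
    List (List (String × String))
  | [], aft => aft.map (fun p => pvEntryB p.1 "INSERT" "")
  | bs, [] => bs.map (fun p => pvEntryB p.1 "DELETE" "")
  | (bk, b) :: bs, (ak, a) :: aft =>
    if bk < ak then pvEntryB bk "DELETE" "" :: pvMergeB bs ((ak, a) :: aft)
    else if ak < bk then pvEntryB ak "INSERT" "" :: pvMergeB ((bk, b) :: bs) aft
    else
      let changed := pvChangedB b a
      (if changed.isEmpty then [] else [pvEntryB bk "UPDATE" (PySem.Str.join "|" changed)])
        ++ pvMergeB bs aft
termination_by bs aft => bs.length + aft.length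

def diff_rows_alt (before_rows : List (List (String × String))) (after_rows : List (List (String × String))) (primary_keys : List String) : List (List (String × String)) :=
  pvMergeB (pvKeyedB before_rows primary_keys) (pvKeyedB after_rows primary_keys)

-- ===== PRECONDITION & SPEC =====
-- Pre_ excludes exactly the inputs on which A raises ValueError (a row missing a primary-key column); B raises KeyError there too.
def Pre_diff_rows (before_rows : List (List (String × String))) (after_rows : List (List (String × String))) (primary_keys : List String) : Prop :=
  ((before_rows ++ after_rows).all (fun r => primary_keys.all (fun k => r.any (fun p => p.1 == k)))) = true
instance (before_rows : List (List (String × String))) (after_rows : List (List (String × String))) (primary_keys : List String) : Decidable (Pre_diff_rows before_rows after_rows primary_keys) := by unfold Pre_diff_rows; infer_instance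

def pvWitness_diff_rows : (List (List (String × String))) × (List (List (String × String))) × List String :=
  ([[("id", "1"), ("v", "a")], [("id", "2"), ("v", "b")]],
   [[("id", "2"), ("v", "c")], [("id", "3"), ("v", "d")]],
   ["id"])

def Spec_diff_rows (before_rows : List (List (String × String))) (after_rows : List (List (String × String))) (primary_keys : List String) (out : List (List (String × String))) : Prop := out = diff_rows_alt before_rows after_rows primary_keys
instance (before_rows : List (List (String × String))) (after_rows : List (List (String × String))) (primary_keys : List String) (out : List (List (String × String))) : Decidable (Spec_diff_rows before_rows after_rows primary_keys out) := by unfold Spec_diff_rows; infer_instance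

-- ===== CLAIM (what is proved, stated in full; the proofs are below) =====
def Claim_equal_diff_rows : Prop := ∀ (before_rows : List (List (String × String))) (after_rows : List (List (String × String))) (primary_keys : List String), Dom_diff_rows before_rows after_rows primary_keys → Pre_diff_rows before_rows after_rows primary_keys → Spec_diff_rows before_rows after_rows primary_keys (diff_rows before_rows after_rows primary_keys)

-- ===== LEMMAS AND PROOFS =====

-- merge of two key lists (proof device: names the key order pvMergeB walks)
def pvKMerge : List String → List String → List String
  | [], ys => ys
  | xs, [] => xs
  | x :: xs, y :: ys =>
    if x < y then x :: pvKMerge xs (y :: ys)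
    else if y < x then y :: pvKMerge (x :: xs) ys
    else x :: pvKMerge xs ys
termination_by xs ys => xs.length + ys.length

-- per-key contribution of A's loop body
def pvG (bmap amap : PySem.Dict String (List (String × String))) (key : String) :
    List (List (String × String)) :=
  match bmap.get? key with
  | none => [pvEntryB key "INSERT" ""]
  | some b =>
    match amap.get? key with
    | none => [pvEntryB key "DELETE" ""]
    | some a =>
      let changed := pvChangedA b a
      if changed.isEmpty then [] else [pvEntryB key "UPDATE" (PySem.Str.join "|" changed)]

-- same contribution, looked up in the sorted assoc lists
def pvGL (bs aft : List (String × List (String × String))) (key : String) :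
    List (List (String × String)) :=
  match bs.lookup key with
  | none => [pvEntryB key "INSERT" ""]
  | some b =>
    match aft.lookup key with
    | none => [pvEntryB key "DELETE" ""]
    | some a =>
      let changed := pvChangedB b a
      if changed.isEmpty then [] else [pvEntryB key "UPDATE" (PySem.Str.join "|" changed)]

theorem pvMem_kmerge (xs ys : List String) (k : String) :
    k ∈ pvKMerge xs ys ↔ k ∈ xs ∨ k ∈ ys := by
  induction xs, ys using pvKMerge.induct with
  | case1 ys => simp [pvKMerge]
  | case2 xs h => cases xs <;> simp [pvKMerge]
  | case3 x xs y ys hlt ih => simp [pvKMerge, hlt, ih]; tauto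
  | case4 x xs y ys hlt hgt ih => simp [pvKMerge, hlt, hgt, ih]; tauto
  | case5 x xs y ys hlt hgt ih =>
    have hxy : x = y := le_antisymm (not_lt.1 hgt) (not_lt.1 hlt)
    subst hxy
    simp [pvKMerge, ih]; tauto

theorem pvKMerge_pairwise (xs ys : List String)
    (hx : xs.Pairwise (· < ·)) (hy : ys.Pairwise (· < ·)) :
    (pvKMerge xs ys).Pairwise (· < ·) := by
  induction xs, ys using pvKMerge.induct with
  | case1 ys => simpa [pvKMerge] using hy
  | case2 xs h =>
    cases xs with
    | nil => simp [pvKMerge]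
    | cons x t => simpa [pvKMerge] using hx
  | case3 x xs y ys hlt ih =>
    rw [List.pairwise_cons] at hx
    rw [pvKMerge, if_pos hlt, List.pairwise_cons]
    refine ⟨?_, ih hx.2 hy⟩
    intro k hk
    rcases (pvMem_kmerge _ _ _).1 hk with h | h
    · exact hx.1 k h
    · rcases List.mem_cons.1 h with rfl | h
      · exact hlt
      · exact hlt.trans ((List.pairwise_cons.1 hy).1 k h)
  | case4 x xs y ys hlt hgt ih =>
    rw [List.pairwise_cons] at hy
    rw [pvKMerge, if_neg hlt, if_pos hgt, List.pairwise_cons]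
    refine ⟨?_, ih hx hy.2⟩
    intro k hk
    rcases (pvMem_kmerge _ _ _).1 hk with h | h
    · rcases List.mem_cons.1 h with rfl | h
      · exact hgt
      · exact hgt.trans ((List.pairwise_cons.1 hx).1 k h)
    · exact hy.1 k h
  | case5 x xs y ys hlt hgt ih =>
    have hxy : x = y := le_antisymm (not_lt.1 hgt) (not_lt.1 hlt)
    subst hxy
    rw [List.pairwise_cons] at hx hy
    rw [pvKMerge, if_neg hlt, if_neg hgt, List.pairwise_cons]
    refine ⟨?_, ih hx.2 hy.2⟩
    intro k hk
    rcases (pvMem_kmerge _ _ _).1 hk with h | h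
    · exact hx.1 k h
    · exact hy.1 k h

theorem pvLookup_eq_none {β : Type} (l : List (String × β)) (k : String)
    (h : k ∉ l.map Prod.fst) : l.lookup k = none := by
  induction l with
  | nil => rfl
  | cons p t ih =>
    simp only [List.map_cons, List.mem_cons, not_or] at h
    rw [List.lookup_cons]
    have hne : (k == p.1) = false := beq_eq_false_iff_ne.2 h.1
    rw [hne]
    exact ih h.2

theorem pvLookup_eq_some {β : Type} (l : List (String × β)) (k : String) (v : β)
    (hnd : (l.map Prod.fst).Nodup) (h : (k, v) ∈ l) : l.lookup k = some v := by
  induction l with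
  | nil => simp at h
  | cons p t ih =>
    simp only [List.map_cons, List.nodup_cons] at hnd
    rw [List.lookup_cons]
    rcases List.mem_cons.1 h with rfl | hmem
    · simp
    · have hne : (k == p.1) = false := by
        have hm : k ∈ t.map Prod.fst := List.mem_map.2 ⟨(k, v), hmem, rfl⟩
        refine beq_eq_false_iff_ne.2 ?_
        rintro rfl; exact hnd.1 hm
      rw [hne]
      exact ih hnd.2 hmem

theorem pvBuildKey_eq (row : List (String × String)) (pks : List String)
    (h : pks.all (fun k => row.any (fun p => p.1 == k)) = true) :
    pvBuildKeyA? row pks = some (pvKeyOfB row pks) := by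
  unfold pvBuildKeyA? pvKeyOfB
  have hfil : pks.filter (fun k => !((PySem.Dict.mk row).contains k)) = [] := by
    rw [List.filter_eq_nil_iff]
    intro k hk
    have := (List.all_eq_true.1 h) k hk
    simp only [PySem.Dict.contains_mk]
    simpa using this
  simp only [hfil, List.isEmpty_nil, if_true]

theorem pvRowMap_eq (rows : List (List (String × String))) (pks : List String)
    (h : rows.all (fun r => pks.all (fun k => r.any (fun p => p.1 == k))) = true) :
    pvRowMapA rows pks = some (pvBuildMapB rows pks) := by
  unfold pvRowMapA pvBuildMapB
  have aux : ∀ (rs : List (List (String × String))) (d : PySem.Dict String (List (String × String))),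
      rs.all (fun r => pks.all (fun k => r.any (fun p => p.1 == k))) = true →
      rs.foldl (fun od r => od.bind (fun d => (pvBuildKeyA? r pks).map (fun k => d.insert k r))) (some d)
        = some (rs.foldl (fun d r => d.insert (pvKeyOfB r pks) r) d) := by
    intro rs
    induction rs with
    | nil => intro d _; rfl
    | cons r rs ih =>
      intro d hall
      rw [List.all_cons, Bool.and_eq_true] at hall
      simp only [List.foldl_cons, Option.bind_some, pvBuildKey_eq r pks hall.1, Option.map_some]
      exact ih _ hall.2
  exact aux rows PySem.Dict.empty h

theorem pvBuildMapB_keys_nodup (rows : List (List (String × String))) (pks : List String) :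
    (pvBuildMapB rows pks).keys.Nodup := by
  unfold pvBuildMapB
  exact PySem.Dict.nodup_keys_foldl_insert_key rows (fun r => pvKeyOfB r pks) (fun _ r => r) _
    PySem.Dict.nodup_keys_empty

theorem pvKeyedB_keys_perm (rows : List (List (String × String))) (pks : List String) :
    ((pvKeyedB rows pks).map Prod.fst).Perm (pvBuildMapB rows pks).keys := by
  have h := PySem.List.sorted_perm (pvBuildMapB rows pks).items (fun p : String × List (String × String) => p.1) false
  simpa [PySem.Dict.keys] using h.map Prod.fst

theorem pvKeyedB_keys_nodup (rows : List (List (String × String))) (pks : List String) :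
    ((pvKeyedB rows pks).map Prod.fst).Nodup :=
  (pvKeyedB_keys_perm rows pks).nodup_iff.2 (pvBuildMapB_keys_nodup rows pks)

theorem pvKeyedB_keys_sorted (rows : List (List (String × String))) (pks : List String) :
    ((pvKeyedB rows pks).map Prod.fst).Pairwise (· < ·) := by
  have hle : ((pvKeyedB rows pks).map Prod.fst).Pairwise (· ≤ ·) := by
    have := PySem.List.sorted_pairwise (pvBuildMapB rows pks).items (fun p : String × List (String × String) => p.1)
    rw [List.pairwise_map]
    exact this
  have hnd := pvKeyedB_keys_nodup rows pks
  exact (hle.and hnd).imp (fun h => lt_of_le_of_ne h.1 h.2)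

theorem pvKeyedB_lookup (rows : List (List (String × String))) (pks : List String) (k : String) :
    (pvKeyedB rows pks).lookup k = (pvBuildMapB rows pks).get? k := by
  rcases hg : (pvBuildMapB rows pks).get? k with _ | v
  · refine pvLookup_eq_none _ _ ?_
    have hk := (PySem.Dict.get?_eq_none_iff_not_mem_keys _ _).1 hg
    intro hmem
    exact hk ((pvKeyedB_keys_perm rows pks).mem_iff.1 hmem)
  · refine pvLookup_eq_some _ _ _ (pvKeyedB_keys_nodup rows pks) ?_
    have hit : (k, v) ∈ (pvBuildMapB rows pks).items :=
      PySem.Dict.mem_items_of_get?_eq_some _ hg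
    exact (PySem.List.mem_sorted _ _ _ _).2 hit

theorem pvSortedUnion_eq_kmerge (bmap amap : PySem.Dict String (List (String × String)))
    (xs ys : List String) (hx : xs.Pairwise (· < ·)) (hy : ys.Pairwise (· < ·))
    (hpx : xs.Perm bmap.keys) (hpy : ys.Perm amap.keys) :
    PySem.List.sorted ((PySem.Set.ofList bmap.keys).union (PySem.Set.ofList amap.keys)) (fun k => k) false
      = pvKMerge xs ys := by
  refine PySem.List.sorted_eq_of_perm_of_pairwise_lt _ _ _ ?_ ?_
  · refine (List.perm_ext_iff_of_nodup ?_ ?_).2 ?_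
    · exact (pvKMerge_pairwise xs ys hx hy).imp ne_of_lt
    · exact PySem.Set.nodup_union _ _ (PySem.Set.nodup_ofList _)
    · intro k
      rw [pvMem_kmerge]
      simp only [PySem.Set.mem_union, PySem.Set.mem_ofList]
      rw [hpx.mem_iff, hpy.mem_iff]
  · exact pvKMerge_pairwise xs ys hx hy

theorem pvChangedB_eq (b a : List (String × String)) : pvChangedB b a = pvChangedA b a := by
  unfold pvChangedA pvChangedB
  set S := (PySem.Set.ofList (PySem.Dict.mk b).keys).union (PySem.Set.ofList (PySem.Dict.mk a).keys) with hS
  set p := fun c => !((PySem.Dict.mk b).getD c "" == (PySem.Dict.mk a).getD c "") with hp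
  refine (PySem.List.sorted_eq_of_perm_of_pairwise_lt _ _ _ ?_ ?_).symm
  · exact (PySem.List.sorted_perm S (fun c => c) false).filter p
  · have hle : (PySem.List.sorted S (fun c => c) false).Pairwise (· ≤ ·) :=
      PySem.List.sorted_pairwise S (fun c => c)
    have hnd : (PySem.List.sorted S (fun c => c) false).Nodup :=
      (PySem.List.sorted_perm S (fun c => c) false).nodup_iff.2
        (PySem.Set.nodup_union _ _ (PySem.Set.nodup_ofList _))
    exact ((hle.and hnd).imp (fun h => lt_of_le_of_ne h.1 h.2)).filter p

-- drop an unmatched head from either side of the lookup pair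
theorem pvGL_drop_left (bk : String) (b : List (String × String))
    (bs aft : List (String × List (String × String))) (k : String) (h : k ≠ bk) :
    pvGL ((bk, b) :: bs) aft k = pvGL bs aft k := by
  unfold pvGL
  rw [List.lookup_cons]
  have hne : (k == bk) = false := beq_eq_false_iff_ne.2 h
  rw [hne]

theorem pvGL_drop_right (ak : String) (a : List (String × String))
    (bs aft : List (String × List (String × String))) (k : String) (h : k ≠ ak) :
    pvGL bs ((ak, a) :: aft) k = pvGL bs aft k := by
  unfold pvGL
  rcases bs.lookup k with _ | b
  · rfl
  · rw [List.lookup_cons]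
    have hne : (k == ak) = false := beq_eq_false_iff_ne.2 h
    rw [hne]

theorem pvFlatMap_singleton {α β : Type} (l : List α) (f : α → β) :
    l.flatMap (fun x => [f x]) = l.map f := by
  induction l with
  | nil => rfl
  | cons x t ih => simp [List.flatMap_cons, ih]

theorem pvLookup_isSome_of_mem {β : Type} (l : List (String × β)) (k : String)
    (h : k ∈ l.map Prod.fst) : ∃ v, l.lookup k = some v := by
  induction l with
  | nil => simp at h
  | cons p t ih =>
    rw [List.lookup_cons]
    by_cases hk : k = p.1
    · subst hk; exact ⟨p.2, by simp⟩
    · rw [beq_eq_false_iff_ne.2 hk]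
      rw [List.map_cons] at h
      rcases List.mem_cons.1 h with h' | hmem
      · exact absurd h' hk
      · exact ih hmem

theorem pvMergeB_eq_flatMap (bs aft : List (String × List (String × String)))
    (hb : (bs.map Prod.fst).Pairwise (· < ·)) (ha : (aft.map Prod.fst).Pairwise (· < ·)) :
    pvMergeB bs aft = (pvKMerge (bs.map Prod.fst) (aft.map Prod.fst)).flatMap (pvGL bs aft) := by
  induction bs, aft using pvMergeB.induct with
  | case1 aft =>
    rw [pvMergeB]
    simp only [List.map_nil, pvKMerge]
    have h1 : ∀ k ∈ aft.map Prod.fst, pvGL [] aft k = [pvEntryB k "INSERT" ""] := by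
      intro k _; rfl
    rw [List.flatMap_congr h1, pvFlatMap_singleton, List.map_map]
    rfl
  | case2 bs h =>
    cases bs with
    | nil => simp [pvMergeB, pvKMerge]
    | cons p t =>
      rw [pvMergeB]
      have hkm : pvKMerge ((p :: t).map Prod.fst) (List.map Prod.fst ([] : List (String × List (String × String)))) = (p :: t).map Prod.fst := by
        simp [pvKMerge]
      have h1 : ∀ k ∈ (p :: t).map Prod.fst,
          pvGL (p :: t) [] k = [pvEntryB k "DELETE" ""] := by
        intro k hk
        obtain ⟨v, hv⟩ := pvLookup_isSome_of_mem _ k hk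
        unfold pvGL
        rw [hv]
        rfl
      rw [hkm, List.flatMap_congr h1, pvFlatMap_singleton, List.map_map]
      · rfl
      · simp
  | case3 bk b bs ak a aft hlt ih =>
    simp only [List.map_cons] at hb ha ⊢
    rw [List.pairwise_cons] at hb ha
    rw [pvMergeB, if_pos hlt]
    rw [pvKMerge, if_pos hlt, List.flatMap_cons]
    have hhead : pvGL ((bk, b) :: bs) ((ak, a) :: aft) bk = [pvEntryB bk "DELETE" ""] := by
      unfold pvGL
      rw [List.lookup_cons]
      simp only [beq_self_eq_true]
      have hnot : bk ∉ ((ak, a) :: aft).map Prod.fst := by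
        simp only [List.map_cons, List.mem_cons, not_or]
        refine ⟨ne_of_lt hlt, fun hm => ?_⟩
        exact absurd (hlt.trans (ha.1 bk hm)) (lt_irrefl bk)
      rw [pvLookup_eq_none _ _ hnot]
    rw [hhead]
    have htail : ∀ k ∈ pvKMerge (bs.map Prod.fst) (ak :: aft.map Prod.fst),
        pvGL ((bk, b) :: bs) ((ak, a) :: aft) k = pvGL bs ((ak, a) :: aft) k := by
      intro k hk
      refine pvGL_drop_left bk b bs _ k ?_
      rcases (pvMem_kmerge _ _ _).1 hk with h | h
      · exact (ne_of_lt (hb.1 k h)).symm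
      · rcases List.mem_cons.1 h with rfl | h
        · exact (ne_of_lt hlt).symm
        · exact (ne_of_lt (hlt.trans (ha.1 k h))).symm
    rw [List.flatMap_congr htail]
    have := ih hb.2 (List.pairwise_cons.2 ha)
    simp only [List.map_cons] at this
    rw [← this]
    rfl
  | case4 bk b bs ak a aft hlt hgt ih =>
    simp only [List.map_cons] at hb ha ⊢
    rw [List.pairwise_cons] at hb ha
    rw [pvMergeB, if_neg hlt, if_pos hgt]
    rw [pvKMerge, if_neg hlt, if_pos hgt, List.flatMap_cons]
    have hhead : pvGL ((bk, b) :: bs) ((ak, a) :: aft) ak = [pvEntryB ak "INSERT" ""] := by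
      unfold pvGL
      have hnot : ak ∉ ((bk, b) :: bs).map Prod.fst := by
        simp only [List.map_cons, List.mem_cons, not_or]
        refine ⟨ne_of_lt hgt, fun hm => ?_⟩
        exact absurd (hgt.trans (hb.1 ak hm)) (lt_irrefl ak)
      rw [pvLookup_eq_none _ _ hnot]
    rw [hhead]
    have htail : ∀ k ∈ pvKMerge (bk :: bs.map Prod.fst) (aft.map Prod.fst),
        pvGL ((bk, b) :: bs) ((ak, a) :: aft) k = pvGL ((bk, b) :: bs) aft k := by
      intro k hk
      refine pvGL_drop_right ak a _ aft k ?_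
      rcases (pvMem_kmerge _ _ _).1 hk with h | h
      · rcases List.mem_cons.1 h with rfl | h
        · exact (ne_of_lt hgt).symm
        · exact (ne_of_lt (hgt.trans (hb.1 k h))).symm
      · exact (ne_of_lt (ha.1 k h)).symm
    rw [List.flatMap_congr htail]
    have := ih (List.pairwise_cons.2 hb) ha.2
    simp only [List.map_cons] at this
    rw [← this]
    rfl
  | case5 bk b bs ak a aft hlt hgt ih =>
    have hba : bk = ak := le_antisymm (not_lt.1 hgt) (not_lt.1 hlt)
    subst hba
    simp only [List.map_cons] at hb ha ⊢
    rw [List.pairwise_cons] at hb ha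
    rw [pvMergeB, if_neg hlt, if_neg hgt]
    rw [pvKMerge, if_neg hlt, if_neg hgt, List.flatMap_cons]
    have hhead : pvGL ((bk, b) :: bs) ((bk, a) :: aft) bk
        = (if (pvChangedB b a).isEmpty then []
           else [pvEntryB bk "UPDATE" (PySem.Str.join "|" (pvChangedB b a))]) := by
      unfold pvGL
      rw [List.lookup_cons, List.lookup_cons]
      simp only [beq_self_eq_true]
    rw [hhead]
    have htail : ∀ k ∈ pvKMerge (bs.map Prod.fst) (aft.map Prod.fst),
        pvGL ((bk, b) :: bs) ((bk, a) :: aft) k = pvGL bs aft k := by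
      intro k hk
      have hne : k ≠ bk := by
        rcases (pvMem_kmerge _ _ _).1 hk with h | h
        · exact (ne_of_lt (hb.1 k h)).symm
        · exact (ne_of_lt (ha.1 k h)).symm
      rw [pvGL_drop_left bk b bs _ k hne, pvGL_drop_right bk a bs aft k hne]
    rw [List.flatMap_congr htail, ← ih hb.2 ha.2]

-- pvGL on the sorted keyed lists is A's per-key contribution
theorem pvGL_keyed (before_rows after_rows : List (List (String × String))) (pks : List String) (k : String) :
    pvGL (pvKeyedB before_rows pks) (pvKeyedB after_rows pks) k
      = pvG (pvBuildMapB before_rows pks) (pvBuildMapB after_rows pks) k := by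
  unfold pvGL pvG
  rw [pvKeyedB_lookup, pvKeyedB_lookup]
  rcases (pvBuildMapB before_rows pks).get? k with _ | b
  · rfl
  · rcases (pvBuildMapB after_rows pks).get? k with _ | a
    · rfl
    · simp only [pvChangedB_eq]

-- ===== VERDICT (by name: the statement is the Claim_ definition above) =====
theorem diff_rows_spec : Claim_equal_diff_rows := by
  intro before_rows after_rows primary_keys _hdom hpre
  unfold Pre_diff_rows at hpre
  rw [List.all_append, Bool.and_eq_true] at hpre
  set bmap := pvBuildMapB before_rows primary_keys with hbm
  set amap := pvBuildMapB after_rows primary_keys with ham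
  set bs := pvKeyedB before_rows primary_keys with hbs
  set aft := pvKeyedB after_rows primary_keys with hafts
  have hA : diff_rows before_rows after_rows primary_keys
      = (PySem.List.sorted ((PySem.Set.ofList bmap.keys).union (PySem.Set.ofList amap.keys)) (fun k => k) false).flatMap (pvG bmap amap) := by
    unfold diff_rows
    rw [pvRowMap_eq _ _ hpre.1, pvRowMap_eq _ _ hpre.2]
    have hbody : (fun (diffs : List (List (String × String))) key =>
        match bmap.get? key with
        | none => diffs ++ [[("key", key), ("status", "INSERT"), ("changed_columns", "")]]
        | some b =>
          match amap.get? key with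
          | none => diffs ++ [[("key", key), ("status", "DELETE"), ("changed_columns", "")]]
          | some a =>
            let changed := pvChangedA b a
            if changed.isEmpty then diffs
            else diffs ++ [[("key", key), ("status", "UPDATE"), ("changed_columns", PySem.Str.join "|" changed)]])
        = fun diffs key => diffs ++ pvG bmap amap key := by
      funext diffs key
      unfold pvG
      rcases bmap.get? key with _ | b
      · rfl
      · rcases amap.get? key with _ | a
        · rfl
        · simp only []; split <;> simp [pvEntryB]
    show (PySem.List.sorted ((PySem.Set.ofList bmap.keys).union (PySem.Set.ofList amap.keys)) (fun k => k) false).foldl _ [] = _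
    rw [hbody, PySem.List.foldl_append_eq_flatMap, List.nil_append]
  rw [Spec_diff_rows, hA]
  rw [pvSortedUnion_eq_kmerge bmap amap (bs.map Prod.fst) (aft.map Prod.fst)
        (pvKeyedB_keys_sorted _ _) (pvKeyedB_keys_sorted _ _)
        (pvKeyedB_keys_perm _ _) (pvKeyedB_keys_perm _ _)]
  have hcong : ∀ k ∈ pvKMerge (bs.map Prod.fst) (aft.map Prod.fst),
      pvG bmap amap k = pvGL bs aft k := by
    intro k _
    exact (pvGL_keyed before_rows after_rows primary_keys k).symm
  rw [List.flatMap_congr hcong]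
  rw [← pvMergeB_eq_flatMap bs aft (pvKeyedB_keys_sorted _ _) (pvKeyedB_keys_sorted _ _)]
  rfl
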